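-- pv_equiv track=rewrite | github.com/MarcPIster/hackertons | gamejam1/Assets/Code/map.py | check_map_way
-- ===== SOURCE A (Python) =====
-- def check_map_way(maps, count):
--     way_arr = []
--     check = 0
--
--     for y in maps[count]:
--         for x in y:
--             if x == " ":
--                 way_arr.append(check)
--                 check += 1
--             if x == "o":
--                 way_arr.append(check)
--                 check += 1
--             if x == "O":
--                 way_arr.append(check)
--                 check += 1
--             if x == "P":
--                 way_arr.append(check)
--                 check += 1
--             if x == "p":
--                 way_arr.append(check)
--                 check += 1
--             if x == "n":
--                 way_arr.append(check)
--                 check += 1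
--
--     return way_arr
-- ===== SOURCE B (Python) =====
-- def check_map_way(maps, count):
--     freq = {}
--     for row in maps[count]:
--         for ch in row:
--             freq[ch] = freq.get(ch, 0) + 1
--     total = (freq.get(" ", 0) + freq.get("o", 0) + freq.get("O", 0)
--              + freq.get("P", 0) + freq.get("p", 0) + freq.get("n", 0))
--     return list(range(total))
-- ===== Notes on version B (the rewrite author's own statement) =====
-- stated objective: alternative
-- what changed: B builds a frequency dictionary of all cells in a first pass (no per-cell walkable test, no growing list), then sums the counts of the six walkable symbols by dictionary lookup and returns that many indices as list(range(total)), instead of A's per-cell six-way conditional appending a running counter to a list.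
import Mathlib
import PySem

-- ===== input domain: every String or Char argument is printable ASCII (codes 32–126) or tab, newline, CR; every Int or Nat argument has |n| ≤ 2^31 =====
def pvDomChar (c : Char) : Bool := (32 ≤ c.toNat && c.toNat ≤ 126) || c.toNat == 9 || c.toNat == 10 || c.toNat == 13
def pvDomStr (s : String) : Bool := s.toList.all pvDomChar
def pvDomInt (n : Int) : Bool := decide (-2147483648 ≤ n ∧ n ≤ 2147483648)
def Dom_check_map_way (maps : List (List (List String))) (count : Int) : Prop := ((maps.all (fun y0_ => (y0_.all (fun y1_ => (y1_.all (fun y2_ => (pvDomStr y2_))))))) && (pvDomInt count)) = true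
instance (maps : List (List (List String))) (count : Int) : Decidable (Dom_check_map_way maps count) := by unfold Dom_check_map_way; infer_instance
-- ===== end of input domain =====

-- B builds a frequency dictionary of all cells first, then sums the counts of the six
-- walkable symbols and returns list(range(total)). (objective: alternative)

-- ===== PORT A =====
-- one cell x: the six sequential 'if x == …: way_arr.append(check); check += 1' tests
def cmwCell (st : List Int × Int) (x : String) : List Int × Int :=
  let st := if x == " " then (st.1 ++ [st.2], st.2 + 1) else st
  let st := if x == "o" then (st.1 ++ [st.2], st.2 + 1) else st
  let st := if x == "O" then (st.1 ++ [st.2], st.2 + 1) else st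
  let st := if x == "P" then (st.1 ++ [st.2], st.2 + 1) else st
  let st := if x == "p" then (st.1 ++ [st.2], st.2 + 1) else st
  if x == "n" then (st.1 ++ [st.2], st.2 + 1) else st

def check_map_way (maps : List (List (List String))) (count : Int) : List Int :=
  match PySem.List.pyGet? maps count with
  | none => []   -- IndexError in Python; excluded by Pre_check_map_way
  | some grid =>
    (grid.foldl (fun st y => y.foldl cmwCell st) (([] : List Int), (0 : Int))).1

-- ===== PORT B =====
def check_map_way_alt (maps : List (List (List String))) (count : Int) : List Int :=
  match PySem.List.pyGet? maps count with
  | none => []   -- IndexError in Python; excluded by Pre_check_map_way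
  | some grid =>
    let freq : PySem.Dict String Int :=
      grid.foldl (fun d row => row.foldl (fun d ch => d.modify ch 0 (· + 1)) d) PySem.Dict.empty
    let total : Int := freq.getD " " 0 + freq.getD "o" 0 + freq.getD "O" 0
      + freq.getD "P" 0 + freq.getD "p" 0 + freq.getD "n" 0
    PySem.List.pyRange 0 total 1

-- ===== PRECONDITION & SPEC =====
-- Pre_ excludes exactly the inputs where maps[count] raises IndexError in Python.
def Pre_check_map_way (maps : List (List (List String))) (count : Int) : Prop :=
  PySem.Raise.InRange maps.length count
instance (maps : List (List (List String))) (count : Int) : Decidable (Pre_check_map_way maps count) := by unfold Pre_check_map_way; infer_instance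

def pvWitness_check_map_way : List (List (List String)) × Int := ([[[" ", "x"], ["o"]]], 0)

def Spec_check_map_way (maps : List (List (List String))) (count : Int) (out : List Int) : Prop := out = check_map_way_alt maps count
instance (maps : List (List (List String))) (count : Int) (out : List Int) : Decidable (Spec_check_map_way maps count out) := by unfold Spec_check_map_way; infer_instance

-- ===== CLAIM (what is proved, stated in full; the proofs are below) =====
def Claim_equal_check_map_way : Prop := ∀ (maps : List (List (List String))) (count : Int), Dom_check_map_way maps count → Pre_check_map_way maps count → Spec_check_map_way maps count (check_map_way maps count)

-- ===== LEMMAS AND PROOFS =====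

def cmwIsWay (x : String) : Bool := x == " " || x == "o" || x == "O" || x == "P" || x == "p" || x == "n"

-- A's six equality tests fire for exactly one of the six walkable symbols
theorem cmwCell_eq (st : List Int × Int) (x : String) :
    cmwCell st x = if cmwIsWay x then (st.1 ++ [st.2], st.2 + 1) else st := by
  unfold cmwCell cmwIsWay
  by_cases h1 : x = " " <;> by_cases h2 : x = "o" <;> by_cases h3 : x = "O" <;>
    by_cases h4 : x = "P" <;> by_cases h5 : x = "p" <;> by_cases h6 : x = "n" <;>
    simp_all

-- A's loop over a flat cell list yields exactly the range [0, #walkable)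
theorem cmwCell_flat (cells : List String) (l : List Int) (c : Int) :
    cells.foldl cmwCell (l, c) =
      (l ++ PySem.List.pyRange c (c + ((cells.filter cmwIsWay).length : Int)) 1,
       c + ((cells.filter cmwIsWay).length : Int)) := by
  induction cells generalizing l c with
  | nil => simp [PySem.List.pyRange_one_eq_nil]
  | cons x xs ih =>
    simp only [List.foldl_cons, cmwCell_eq]
    by_cases h : cmwIsWay x
    · simp only [h, List.filter_cons_of_pos h, List.length_cons]
      rw [ih]
      simp only [Prod.mk.injEq]
      push_cast
      have hend : c + (((xs.filter cmwIsWay).length : Int) + 1)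
          = c + 1 + ((xs.filter cmwIsWay).length : Int) := by ring
      rw [hend]
      refine ⟨?_, rfl⟩
      rw [PySem.List.pyRange_one_cons
        (a := c) (b := c + 1 + ((xs.filter cmwIsWay).length : Int)) (by omega),
        List.append_assoc, List.singleton_append]
    · simp only [h, List.filter_cons_of_neg h]
      exact ih (l := l) (c := c)

-- the six per-symbol counts of a list sum to the number of walkable cells in it
theorem cmwCount_six (l : List String) :
    ((l.count " " : Int) + l.count "o" + l.count "O" + l.count "P" + l.count "p" + l.count "n")
      = ((l.filter cmwIsWay).length : Int) := by
  induction l with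
  | nil => simp
  | cons x xs ih =>
    by_cases h : cmwIsWay x
    · simp only [List.filter_cons_of_pos h, List.length_cons]
      unfold cmwIsWay at h
      simp only [Bool.or_eq_true, beq_iff_eq] at h
      rcases h with ((((h|h)|h)|h)|h)|h <;> subst h <;>
        simp <;> omega
    · simp only [List.filter_cons_of_neg h]
      unfold cmwIsWay at h
      simp only [Bool.or_eq_true, beq_iff_eq, not_or] at h
      obtain ⟨⟨⟨⟨⟨h1,h2⟩,h3⟩,h4⟩,h5⟩,h6⟩ := h
      simp only [List.count_cons, beq_iff_eq]
      rw [if_neg h1, if_neg h2, if_neg h3, if_neg h4, if_neg h5, if_neg h6]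
      push_cast
      omega

-- ===== VERDICT (by name: the statement is the Claim_ definition above) =====
theorem check_map_way_spec : Claim_equal_check_map_way := by
  intro maps count _ hpre
  unfold Spec_check_map_way check_map_way check_map_way_alt
  have h : (PySem.List.pyGet? maps count).isSome := by
    rcases Option.eq_none_or_eq_some (PySem.List.pyGet? maps count) with h | ⟨g, h⟩
    · exact absurd ((PySem.List.pyGet?_eq_none_iff _ _).mp h) (not_not.mpr hpre)
    · simp [h]
  rcases Option.isSome_iff_exists.mp h with ⟨g, hg⟩
  simp only [hg, ← List.foldl_flatten]
  rw [cmwCell_flat]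
  have hcount : ∀ v : String,
      ((g.flatten.foldl (fun d ch => d.modify ch 0 (· + 1)) PySem.Dict.empty).getD v 0)
        = (g.flatten.count v : Int) := by
    intro v
    rw [PySem.Dict.getD_foldl_modify_add_one]
    simp [PySem.Dict.empty, PySem.Dict.getD, PySem.Dict.get?]
  simp only [hcount, cmwCount_six, zero_add, List.nil_append]
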